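-- pv_equiv track=rewrite | github.com/akunito/my_nixos | scripts/generate_docs_index.py | extract_first_comment_block
-- ===== SOURCE A (Python) =====
-- from typing import Any, Dict, List, Optional, Tuple
--
-- def extract_first_comment_block(content: str) -> Optional[str]:
--     """Extract the first comment block from a Nix file."""
--     lines = content.split('\n')
--     comments = []
--     in_comment_block = False
--
--     for line in lines:
--         stripped = line.strip()
--         # Skip empty lines and imports at the start
--         if not stripped or stripped.startswith('imports'):
--             continue
--
--         # Check for comment
--         if stripped.startswith('#'):
--             comment = stripped[1:].strip()
--             if comment:  # Non-empty comment
--                 comments.append(comment)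
--                 in_comment_block = True
--         elif in_comment_block and not stripped.startswith('#'):
--             # End of comment block
--             break
--
--     if comments:
--         # Return first meaningful comment (skip pure separators)
--         for comment in comments:
--             if len(comment) > 10 and not comment.startswith('---'):
--                 return comment
--         return comments[0] if comments else None
--     return None
-- ===== SOURCE B (Python) =====
-- def extract_first_comment_block(content):
--     """Staged pipeline: strip+filter lines, drop-while to the block start,
--     take-while the '#' run, then pick the first meaningful comment."""
--     kept = [s for s in (l.strip() for l in content.split('\n'))
--             if s and not s.startswith('imports')]
--
--     def text(s):
--         return s[1:].strip() if s.startswith('#') else ''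
--
--     tail = kept
--     while tail and not text(tail[0]):        # drop-while: no comment text yet
--         tail = tail[1:]
--     if not tail:
--         return None
--     block = []
--     while tail and tail[0].startswith('#'):  # take-while: the '#' run
--         block.append(tail[0])
--         tail = tail[1:]
--     comments = [text(s) for s in block if text(s)]
--     return next((c for c in comments if len(c) > 10 and not c.startswith('---')),
--                 comments[0])
-- ===== Notes on version B (the rewrite author's own statement) =====
-- stated objective: simpler
-- what changed: A runs a stateful line loop with an in_comment_block flag that collects comments into a list and then scans that list again; B is a staged pipeline -- strip+filter the lines, drop-while to the first line with comment text, take-while the run of hash-comment lines, map/filter to comment texts, then pick the first meaningful one -- with no flag and no stateful loop.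
import Mathlib
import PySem

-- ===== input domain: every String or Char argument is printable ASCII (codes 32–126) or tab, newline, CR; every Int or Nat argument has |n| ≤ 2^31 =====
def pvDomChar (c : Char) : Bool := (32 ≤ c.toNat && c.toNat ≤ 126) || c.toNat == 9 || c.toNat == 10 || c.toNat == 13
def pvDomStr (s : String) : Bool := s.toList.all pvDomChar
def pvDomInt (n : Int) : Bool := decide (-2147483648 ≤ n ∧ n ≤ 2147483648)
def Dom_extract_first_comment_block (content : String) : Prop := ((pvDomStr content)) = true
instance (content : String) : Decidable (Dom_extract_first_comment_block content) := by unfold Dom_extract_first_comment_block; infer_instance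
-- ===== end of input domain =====

-- B replaces A's stateful line loop (flag + collected list + second scan) by a staged
-- pipeline: strip+filter the lines, drop-while to the block start, take-while the
-- run of hash-comment lines, then pick the first meaningful comment; objective: simpler (same cost).

-- ===== PORT A =====
-- the main for-loop of A: collects the comments list
def fcbLoopA (lines : List String) (inBlock : Bool) (acc : List String) : List String :=
  match lines with
  | [] => acc
  | l :: rest =>
    let stripped := PySem.Str.strip l
    if stripped = "" || PySem.Str.startswith stripped "imports" then
      fcbLoopA rest inBlock acc
    else if PySem.Str.startswith stripped "#" then
      let comment := PySem.Str.strip (PySem.Str.slice stripped (some 1) none)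
      if comment ≠ "" then fcbLoopA rest true (acc ++ [comment])
      else fcbLoopA rest inBlock acc
    else if inBlock then acc
    else fcbLoopA rest inBlock acc

def extract_first_comment_block (content : String) : Option String :=
  let comments := fcbLoopA ((PySem.Str.split? content "\n").getD []) false []
  if comments ≠ [] then
    -- the second for-loop: first meaningful comment, else comments[0]
    match comments.find? (fun c => decide (10 < PySem.Str.len c) && !(PySem.Str.startswith c "---")) with
    | some c => some c
    | none => comments.head?
  else none

-- ===== PORT B =====
-- text(s) from Source B
def fcbText (s : String) : String :=
  if PySem.Str.startswith s "#" then PySem.Str.strip (PySem.Str.slice s (some 1) none) else ""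

def extract_first_comment_block_alt (content : String) : Option String :=
  let kept := (((PySem.Str.split? content "\n").getD []).map PySem.Str.strip).filter
      (fun s => !(s == "") && !(PySem.Str.startswith s "imports"))
  let tail := kept.dropWhile (fun s => fcbText s == "")
  if tail.isEmpty then none
  else
    let block := tail.takeWhile (fun s => PySem.Str.startswith s "#")
    let comments := (block.map fcbText).filter (fun c => !(c == ""))
    match comments.find? (fun c => decide (10 < PySem.Str.len c) && !(PySem.Str.startswith c "---")) with
    | some c => some c
    | none => comments.head?

-- ===== PRECONDITION & SPEC =====
def Spec_extract_first_comment_block (content : String) (out : Option String) : Prop := out = extract_first_comment_block_alt content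
instance (content : String) (out : Option String) : Decidable (Spec_extract_first_comment_block content out) := by unfold Spec_extract_first_comment_block; infer_instance

-- ===== CLAIM (what is proved, stated in full; the proofs are below) =====
def Claim_equal_extract_first_comment_block : Prop := ∀ (content : String), Dom_extract_first_comment_block content → Spec_extract_first_comment_block content (extract_first_comment_block content)

-- ===== LEMMAS AND PROOFS =====

-- A's per-line guards after the skip branch, over the already stripped+filtered list
def fcbLoopK (lines : List String) (inBlock : Bool) (acc : List String) : List String :=
  match lines with
  | [] => acc
  | s :: rest =>
    if PySem.Str.startswith s "#" then
      let c := PySem.Str.strip (PySem.Str.slice s (some 1) none)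
      if c ≠ "" then fcbLoopK rest true (acc ++ [c])
      else fcbLoopK rest inBlock acc
    else if inBlock then acc
    else fcbLoopK rest inBlock acc

def fcbMeaningful (c : String) : Bool :=
  decide (10 < PySem.Str.len c) && !(PySem.Str.startswith c "---")

def fcbFinish (cs : List String) : Option String :=
  if cs ≠ [] then
    match cs.find? fcbMeaningful with
    | some c => some c
    | none => cs.head?
  else none

def fcbComments (t : List String) : List String :=
  ((t.takeWhile (fun s => PySem.Str.startswith s "#")).map fcbText).filter (fun c => !(c == ""))

-- B's body applied to an arbitrary kept list
def fcbAltCore (kept : List String) : Option String :=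
  if (kept.dropWhile (fun s => fcbText s == "")).isEmpty then none
  else
    match (fcbComments (kept.dropWhile (fun s => fcbText s == ""))).find? fcbMeaningful with
    | some c => some c
    | none => (fcbComments (kept.dropWhile (fun s => fcbText s == ""))).head?

theorem fcbText_hash (s : String) (hs : PySem.Str.startswith s "#" = true) :
    fcbText s = PySem.Str.strip (PySem.Str.slice s (some 1) none) := by
  unfold fcbText; rw [if_pos hs]

theorem fcbText_nohash (s : String) (hs : ¬ PySem.Str.startswith s "#" = true) :
    fcbText s = "" := by
  unfold fcbText; rw [if_neg hs]

theorem fcbComments_cons_hash (s : String) (rest : List String)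
    (hs : PySem.Str.startswith s "#" = true) (hc : fcbText s ≠ "") :
    fcbComments (s :: rest) = fcbText s :: fcbComments rest := by
  unfold fcbComments
  simp only [List.takeWhile_cons, hs, if_true, List.map_cons, List.filter_cons]
  rw [if_pos (by simp [hc])]

theorem fcbComments_cons_empty (s : String) (rest : List String)
    (hs : PySem.Str.startswith s "#" = true) (hc : fcbText s = "") :
    fcbComments (s :: rest) = fcbComments rest := by
  unfold fcbComments
  simp only [List.takeWhile_cons, hs, if_true, List.map_cons, List.filter_cons]
  rw [if_neg (by simp [hc])]

theorem fcbComments_cons_code (s : String) (rest : List String)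
    (hs : ¬ PySem.Str.startswith s "#" = true) :
    fcbComments (s :: rest) = [] := by
  unfold fcbComments
  simp only [List.takeWhile_cons, if_neg hs, List.map_nil, List.filter_nil]

theorem fcbPred_eq (x : String) :
    (!(x == "") && !(PySem.Str.startswith x "imports")) =
      !(decide (x = "") || PySem.Str.startswith x "imports") := by
  cases h : PySem.Str.startswith x "imports" <;> by_cases hx : x = "" <;> simp [hx]

set_option maxHeartbeats 1000000 in
theorem fcbLoopA_eq_K (lines : List String) (b : Bool) (acc : List String) :
    fcbLoopA lines b acc =
      fcbLoopK ((lines.map PySem.Str.strip).filter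
        (fun s => !(s == "") && !(PySem.Str.startswith s "imports"))) b acc := by
  induction lines generalizing b acc with
  | nil => simp [fcbLoopA, fcbLoopK]
  | cons l rest ih =>
    simp only [fcbLoopA, List.map_cons, List.filter_cons]
    split_ifs <;>
      first
        | exact ih _ _
        | (exfalso; simp only [fcbPred_eq] at *; simp_all; done)
        | (simp only [fcbLoopK]; split_ifs <;> first | exact ih _ _ | rfl)

theorem fcbLoopK_true (t : List String) (acc : List String) :
    fcbLoopK t true acc = acc ++ fcbComments t := by
  induction t generalizing acc with
  | nil => simp [fcbLoopK, fcbComments]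
  | cons s rest ih =>
    simp only [fcbLoopK]
    split_ifs with hs hc
    · rw [ih, fcbComments_cons_hash s rest hs (by rw [fcbText_hash s hs]; exact hc),
        fcbText_hash s hs]
      simp
    · rw [ih, fcbComments_cons_empty s rest hs (by rw [fcbText_hash s hs]; simpa using hc)]
    · rw [fcbComments_cons_code s rest hs]
      simp

theorem fcbLoopK_false (t : List String) :
    fcbFinish (fcbLoopK t false []) = fcbAltCore t := by
  induction t with
  | nil => simp [fcbLoopK, fcbFinish, fcbAltCore]
  | cons s rest ih =>
    by_cases hs : PySem.Str.startswith s "#" = true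
    · by_cases hc : fcbText s = ""
      · have hK : fcbLoopK (s :: rest) false [] = fcbLoopK rest false [] := by
          simp only [fcbLoopK]
          rw [if_pos hs, if_neg (by rw [← fcbText_hash s hs]; simpa using hc)]
        have hdrop : (s :: rest).dropWhile (fun s => fcbText s == "") =
            rest.dropWhile (fun s => fcbText s == "") := by
          simp [hc]
        rw [hK, ih]; unfold fcbAltCore; rw [hdrop]
      · have hK : fcbLoopK (s :: rest) false [] = fcbText s :: fcbComments rest := by
          simp only [fcbLoopK]
          rw [if_pos hs, if_pos (by rw [← fcbText_hash s hs]; exact hc), ← fcbText_hash s hs]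
          simpa using fcbLoopK_true rest [fcbText s]
        have hdrop : (s :: rest).dropWhile (fun s => fcbText s == "") = s :: rest := by
          simp [hc]
        rw [hK]; unfold fcbAltCore
        rw [hdrop, fcbComments_cons_hash s rest hs hc]
        simp [fcbFinish]
    · have hc : fcbText s = "" := fcbText_nohash s hs
      have hK : fcbLoopK (s :: rest) false [] = fcbLoopK rest false [] := by
        simp only [fcbLoopK]
        rw [if_neg hs, if_neg (by simp)]
      have hdrop : (s :: rest).dropWhile (fun s => fcbText s == "") =
          rest.dropWhile (fun s => fcbText s == "") := by
        simp [hc]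
      rw [hK, ih]; unfold fcbAltCore; rw [hdrop]

-- ===== VERDICT (by name: the statement is the Claim_ definition above) =====
theorem extract_first_comment_block_spec : Claim_equal_extract_first_comment_block := by
  intro content _
  unfold Spec_extract_first_comment_block
  show fcbFinish (fcbLoopA ((PySem.Str.split? content "\n").getD []) false []) =
    fcbAltCore ((((PySem.Str.split? content "\n").getD []).map PySem.Str.strip).filter
      (fun s => !(s == "") && !(PySem.Str.startswith s "imports")))
  rw [fcbLoopA_eq_K]
  exact fcbLoopK_false _
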